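-- pv_equiv track=rewrite | github.com/sehraramiz/bookleter | bookleter/shuffle.py | foop
-- ===== SOURCE A (Python) =====
-- def foop(pages_count):
--     if pages_count == 0:
--         raise ValueError("Enter number of pages")
--
--     if pages_count % 8 != 0:
--         raise ValueError("number of pages must be multiple of 8")
--
--     sheets_count = pages_count // 8
--
--     a4_sheets = [{"front": [None for _ in range(4)], "back": [None for _ in range(4)] } for i in range(sheets_count)]
--     cur_page = 1
--
--     for sheet_number in range(sheets_count):
--         # front
--         a4_sheets[sheet_number]["front"][0] = cur_page
--         cur_page += 1
--         a4_sheets[sheet_number]["front"][1] = cur_page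
--         cur_page += 1
--         a4_sheets[sheet_number]["front"][2] = cur_page
--         cur_page += 1
--         a4_sheets[sheet_number]["front"][3] = cur_page
--         cur_page += 1
--
--         # back
--         a4_sheets[sheet_number]["back"][0] = cur_page
--         cur_page += 1
--         a4_sheets[sheet_number]["back"][1] = cur_page
--         cur_page += 1
--         a4_sheets[sheet_number]["back"][2] = cur_page
--         cur_page += 1
--         a4_sheets[sheet_number]["back"][3] = cur_page
--         cur_page += 1
--
--     # vertically rip in half horizontally
--     a5_sheets = [{"front": [None for _ in range(2)], "back": [None for _ in range(2)]} for i in range(sheets_count * 2)]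
--
--     # top half
--     for sheet_number in range(sheets_count):
--         # front
--         a5_sheets[sheet_number]["front"][0] = a4_sheets[sheet_number]["front"][0]
--         a5_sheets[sheet_number]["front"][1] = a4_sheets[sheet_number]["front"][1]
--
--         # back
--         a5_sheets[sheet_number]["back"][0] = a4_sheets[sheet_number]["back"][0]
--         a5_sheets[sheet_number]["back"][1] = a4_sheets[sheet_number]["back"][1]
--
--     # bottom half
--     for sheet_number in range(sheets_count):
--         # front
--         a5_sheets[sheets_count + sheet_number]["front"][0] = a4_sheets[sheet_number]["front"][2]
--         a5_sheets[sheets_count + sheet_number]["front"][1] = a4_sheets[sheet_number]["front"][3]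
--
--         # back
--         a5_sheets[sheets_count + sheet_number]["back"][0] = a4_sheets[sheet_number]["back"][2]
--         a5_sheets[sheets_count + sheet_number]["back"][1] = a4_sheets[sheet_number]["back"][3]
--
--
--     # number all physical pages in book order
--     cur_page = 0
--
--     # left pages of the stack going up = first half book pages
--     book_order = [None for _ in range(pages_count)]
--     for sheet_number in range(len(a5_sheets)):
--         # back right
--         book_order[cur_page] = a5_sheets[sheet_number]["back"][1]
--         cur_page += 1
--         # front left
--         book_order[cur_page] = a5_sheets[sheet_number]["front"][0]
--         cur_page += 1
--
--     for sheet_number in reversed(range(len(a5_sheets))):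
--         # front right
--         book_order[cur_page] = a5_sheets[sheet_number]["front"][1]
--         cur_page += 1
--         # back left
--         book_order[cur_page] = a5_sheets[sheet_number]["back"][0]
--         cur_page += 1
--
--     # apply translation
--     print_order = [None for _ in range(pages_count)]
--     for index, pg_number in enumerate(book_order):
--         print_order[pg_number - 1] = index + 1
--
--     return print_order
-- ===== SOURCE B (Python) =====
-- def foop(pages_count):
--     if pages_count == 0:
--         raise ValueError("Enter number of pages")
--     if pages_count % 8 != 0:
--         raise ValueError("number of pages must be multiple of 8")
--
--     S = pages_count // 8
--
--     # print_order computed directly in closed form: for 0-based book page q with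
--     # s = q // 8, r = q % 8, the 1-based print position of book page q+1 is given below.
--     print_order = []
--     for q in range(pages_count):
--         s, r = divmod(q, 8)
--         if r == 0:
--             v = 2 * s + 2
--         elif r == 1:
--             v = 8 * S - 2 * s - 1
--         elif r == 2:
--             v = 2 * S + 2 * s + 2
--         elif r == 3:
--             v = 6 * S - 2 * s - 1
--         elif r == 4:
--             v = 8 * S - 2 * s
--         elif r == 5:
--             v = 2 * s + 1
--         elif r == 6:
--             v = 6 * S - 2 * s
--         else:
--             v = 2 * S + 2 * s + 1
--         print_order.append(v)
--     return print_order
-- ===== Notes on version B (the rewrite author's own statement) =====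
-- stated objective: simpler
-- what changed: B computes the inverse permutation (print position of each book page) directly by a closed-form formula per output index in one pass, instead of A's construction of a4/a5 sheet structures, a forward and a reversed pass building book_order, and a final scatter inverting it.
import Mathlib
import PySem

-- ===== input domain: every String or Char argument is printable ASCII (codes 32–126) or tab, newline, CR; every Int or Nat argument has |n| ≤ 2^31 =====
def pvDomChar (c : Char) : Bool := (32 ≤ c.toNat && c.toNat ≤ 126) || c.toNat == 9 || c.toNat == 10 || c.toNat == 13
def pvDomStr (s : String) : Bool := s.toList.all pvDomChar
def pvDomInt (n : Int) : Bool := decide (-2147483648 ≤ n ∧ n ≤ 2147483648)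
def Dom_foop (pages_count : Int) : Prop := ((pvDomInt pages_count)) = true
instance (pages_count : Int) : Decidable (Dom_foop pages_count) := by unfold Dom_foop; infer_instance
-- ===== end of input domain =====

-- B computes the inverse permutation directly: one pass with a closed-form print position
-- per book page, replacing A's sheet structures, two book_order passes and the final
-- inversion scatter; objective: simpler. Return value only.

-- ===== PORT A =====
-- a sheet: (front, back), each a list of page slots
abbrev PvSheet : Type := (List (Option Int)) × (List (Option Int))

-- a4_sheets[i] / a5_sheets[i]: index is always in range when read, so getD's default is never hit
def pvRd (l : List PvSheet) (i : Int) : PvSheet := l.getD i.toNat ([], [])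

-- body of the first loop: the eight assignments into a4_sheets[i] with cur_page threaded
def pvA4Step (st : (List PvSheet) × Int) (i : Int) : (List PvSheet) × Int :=
  let a4 := st.1.modify i.toNat (fun s => (s.1.set 0 (some st.2), s.2)); let c := st.2 + 1
  let a4 := a4.modify i.toNat (fun s => (s.1.set 1 (some c), s.2)); let c := c + 1
  let a4 := a4.modify i.toNat (fun s => (s.1.set 2 (some c), s.2)); let c := c + 1
  let a4 := a4.modify i.toNat (fun s => (s.1.set 3 (some c), s.2)); let c := c + 1
  let a4 := a4.modify i.toNat (fun s => (s.1, s.2.set 0 (some c))); let c := c + 1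
  let a4 := a4.modify i.toNat (fun s => (s.1, s.2.set 1 (some c))); let c := c + 1
  let a4 := a4.modify i.toNat (fun s => (s.1, s.2.set 2 (some c))); let c := c + 1
  let a4 := a4.modify i.toNat (fun s => (s.1, s.2.set 3 (some c))); let c := c + 1
  (a4, c)

-- "top half" loop body
def pvA5Top (a4 : List PvSheet) (a5 : List PvSheet) (i : Int) : List PvSheet :=
  let a5 := a5.modify i.toNat (fun s => (s.1.set 0 ((pvRd a4 i).1.getD 0 none), s.2))
  let a5 := a5.modify i.toNat (fun s => (s.1.set 1 ((pvRd a4 i).1.getD 1 none), s.2))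
  let a5 := a5.modify i.toNat (fun s => (s.1, s.2.set 0 ((pvRd a4 i).2.getD 0 none)))
  let a5 := a5.modify i.toNat (fun s => (s.1, s.2.set 1 ((pvRd a4 i).2.getD 1 none)))
  a5

-- "bottom half" loop body
def pvA5Bot (S : Int) (a4 : List PvSheet) (a5 : List PvSheet) (i : Int) : List PvSheet :=
  let a5 := a5.modify (S + i).toNat (fun s => (s.1.set 0 ((pvRd a4 i).1.getD 2 none), s.2))
  let a5 := a5.modify (S + i).toNat (fun s => (s.1.set 1 ((pvRd a4 i).1.getD 3 none), s.2))
  let a5 := a5.modify (S + i).toNat (fun s => (s.1, s.2.set 0 ((pvRd a4 i).2.getD 2 none)))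
  let a5 := a5.modify (S + i).toNat (fun s => (s.1, s.2.set 1 ((pvRd a4 i).2.getD 3 none)))
  a5

-- first book_order loop body: back right, front left (writes at cur_page; always in range)
def pvBookStep1 (a5 : List PvSheet) (st : (List (Option Int)) × Int) (j : Int) : (List (Option Int)) × Int :=
  let bo := st.1.set st.2.toNat ((pvRd a5 j).2.getD 1 none); let c := st.2 + 1
  let bo := bo.set c.toNat ((pvRd a5 j).1.getD 0 none)
  (bo, c + 1)

-- second book_order loop body: front right, back left
def pvBookStep2 (a5 : List PvSheet) (st : (List (Option Int)) × Int) (j : Int) : (List (Option Int)) × Int :=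
  let bo := st.1.set st.2.toNat ((pvRd a5 j).1.getD 1 none); let c := st.2 + 1
  let bo := bo.set c.toNat ((pvRd a5 j).2.getD 0 none)
  (bo, c + 1)

def foop (pages_count : Int) : List Int :=
  let S := PySem.Int.floordiv pages_count 8
  let a4_0 : List PvSheet := (PySem.List.pyRange 0 S 1).map
      (fun _ => (List.replicate 4 (none : Option Int), List.replicate 4 (none : Option Int)))
  let a4 := ((PySem.List.pyRange 0 S 1).foldl pvA4Step (a4_0, 1)).1
  let a5_0 : List PvSheet := (PySem.List.pyRange 0 (S * 2) 1).map
      (fun _ => (List.replicate 2 (none : Option Int), List.replicate 2 (none : Option Int)))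
  let a5 := (PySem.List.pyRange 0 S 1).foldl (pvA5Top a4) a5_0
  let a5 := (PySem.List.pyRange 0 S 1).foldl (pvA5Bot S a4) a5
  let bo0 : List (Option Int) := (PySem.List.pyRange 0 pages_count 1).map (fun _ => none)
  let st := (PySem.List.pyRange 0 (a5.length : Int) 1).foldl (pvBookStep1 a5) (bo0, 0)
  let st := ((PySem.List.pyRange 0 (a5.length : Int) 1).reverse).foldl (pvBookStep2 a5) st
  -- translation: print_order[pg - 1] = index + 1 (pg - 1 always in range; entries all `some`)
  let po0 : List Int := (PySem.List.pyRange 0 pages_count 1).map (fun _ => 0)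
  (PySem.List.enumerate st.1 0).foldl
    (fun po (p : Int × Option Int) => po.set ((p.2.getD 0) - 1).toNat (p.1 + 1)) po0

-- ===== PORT B =====
-- one pass: for 0-based book page q with s = q // 8, r = q % 8, append its print position
def foop_alt (pages_count : Int) : List Int :=
  let S := PySem.Int.floordiv pages_count 8
  (PySem.List.pyRange 0 pages_count 1).foldl (fun acc q =>
    let s := PySem.Int.floordiv q 8
    let r := PySem.Int.mod q 8
    let v : Int :=
      if r = 0 then 2*s + 2
      else if r = 1 then 8*S - 2*s - 1
      else if r = 2 then 2*S + 2*s + 2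
      else if r = 3 then 6*S - 2*s - 1
      else if r = 4 then 8*S - 2*s
      else if r = 5 then 2*s + 1
      else if r = 6 then 6*S - 2*s
      else 2*S + 2*s + 1
    acc ++ [v]) []

-- ===== PRECONDITION & SPEC =====
-- Pre_ excludes exactly the inputs on which A raises ValueError (a zero page count, or one not divisible by eight); B raises there too
def Pre_foop (pages_count : Int) : Prop :=
  pages_count ≠ 0 ∧ PySem.Int.mod pages_count 8 = 0
instance (pages_count : Int) : Decidable (Pre_foop pages_count) := by unfold Pre_foop; infer_instance
def pvWitness_foop : Int := 8

def Spec_foop (pages_count : Int) (out : List Int) : Prop := out = foop_alt pages_count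
instance (pages_count : Int) (out : List Int) : Decidable (Spec_foop pages_count out) := by unfold Spec_foop; infer_instance

-- ===== CLAIM (what is proved, stated in full; the proofs are below) =====
def Claim_equal_foop : Prop := ∀ (pages_count : Int), Dom_foop pages_count → Pre_foop pages_count → Spec_foop pages_count (foop pages_count)

-- ===== LEMMAS AND PROOFS =====

theorem pv_set_pref {α : Type} (P : List α) (x v : α) (rest : List α) :
    (P ++ x :: rest).set P.length v = P ++ v :: rest := by
  rw [List.set_append_right _ _ le_rfl]; simp

theorem pv_mod_pref {α : Type} (P : List α) (x : α) (f : α → α) (rest : List α) :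
    (P ++ x :: rest).modify P.length f = P ++ f x :: rest := by
  induction P with
  | nil => simp [List.modify]
  | cons a P ih =>
    have h : (a :: P) ++ x :: rest = a :: (P ++ x :: rest) := rfl
    rw [h, List.length_cons, List.modify_succ_cons, ih]
    rfl

theorem pv_set_pref1 {α : Type} (P : List α) (x y v : α) (rest : List α) :
    (P ++ x :: y :: rest).set (P.length + 1) v = P ++ x :: v :: rest := by
  have h := pv_set_pref (P ++ [x]) y v rest
  simp only [List.append_assoc, List.singleton_append, List.length_append,
    List.length_cons, List.length_nil] at h
  simpa using h

-- proof-only closed forms for A's intermediate structures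
def pvBlank4 : PvSheet := (List.replicate 4 none, List.replicate 4 none)
def pvBlank2 : PvSheet := (List.replicate 2 none, List.replicate 2 none)
def pvG4 (i : Int) : PvSheet :=
  ([some (8*i+1), some (8*i+2), some (8*i+3), some (8*i+4)],
   [some (8*i+5), some (8*i+6), some (8*i+7), some (8*i+8)])
def pvE4 (c : Int) (x : PvSheet) : PvSheet :=
  ((((x.1.set 0 (some c)).set 1 (some (c+1))).set 2 (some (c+2))).set 3 (some (c+3)),
   (((x.2.set 0 (some (c+4))).set 1 (some (c+5))).set 2 (some (c+6))).set 3 (some (c+7)))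
-- the four page numbers (f0, f1, b0, b1) of half-sheet m, used to state A's book_order
def pvHalf (S m : Int) : Int × Int × Int × Int :=
  if m < S then (8*m+1, 8*m+2, 8*m+5, 8*m+6)
  else
    let s := m - S
    (8*s+3, 8*s+4, 8*s+7, 8*s+8)

theorem pvA4Step_at (P rest : List PvSheet) (x : PvSheet) (c : Int) :
    pvA4Step (P ++ x :: rest, c) (P.length : Int) = (P ++ pvE4 c x :: rest, c + 8) := by
  simp only [pvA4Step, pvE4, Int.toNat_natCast, pv_mod_pref]
  ring_nf

theorem pvE4_blank (j : Int) : pvE4 (8*j+1) pvBlank4 = pvG4 j := by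
  simp [pvE4, pvBlank4, pvG4, List.set]
  norm_num
  ring_nf
  norm_num

theorem pv_a4_go : ∀ (k j r : Nat) (P : List PvSheet), P.length = j →
    (List.range' j k).foldl (fun st (n : Nat) => pvA4Step st (n : Int))
        (P ++ List.replicate (k + r) pvBlank4, 8*(j:Int)+1)
      = (P ++ (List.range' j k).map (fun (n:Nat) => pvG4 (n : Int)) ++ List.replicate r pvBlank4,
         8*((j:Int)+(k:Int))+1) := by
  intro k
  induction k with
  | zero => intro j r P hP; simp
  | succ k ih =>
    intro j r P hP
    rw [List.range'_succ, List.foldl_cons]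
    have h1 : k + 1 + r = (k + r) + 1 := by omega
    rw [h1, List.replicate_succ]
    rw [show ((j:Int)) = ((P.length : Nat) : Int) by rw [hP], pvA4Step_at]
    rw [hP]
    have h2 : (8*(j:Int)+1) + 8 = 8*((j+1 : Nat) : Int)+1 := by push_cast; ring
    rw [pvE4_blank, h2, List.append_cons P (pvG4 (j:Int)) _]
    rw [ih (j+1) r (P ++ [pvG4 (j:Int)]) (by simp [hP])]
    simp [List.range'_succ]
    omega

theorem pv_fill_go {α : Type} (G : List α → Nat → List α) (F : Nat → α → α) (b : α) (off : Nat)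
    (hG : ∀ (n : Nat) (P : List α) (x : α) (rest : List α),
        P.length = off + n → G (P ++ x :: rest) n = P ++ F n x :: rest) :
    ∀ (k j r : Nat) (P : List α), P.length = off + j →
      (List.range' j k).foldl G (P ++ List.replicate (k + r) b)
        = P ++ (List.range' j k).map (fun n => F n b) ++ List.replicate r b := by
  intro k
  induction k with
  | zero => intro j r P hP; simp
  | succ k ih =>
    intro j r P hP
    rw [List.range'_succ, List.foldl_cons]
    have h1 : k + 1 + r = (k + r) + 1 := by omega
    rw [h1, List.replicate_succ, hG j P b _ hP, List.append_cons P (F j b) _]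
    rw [ih (j+1) r (P ++ [F j b]) (by simp [hP]; omega)]
    simp [List.range'_succ]

theorem pv_fill2_go {α : Type} (G : (List α × Int) → Int → (List α × Int)) (f g : Int → α) (b : α)
    (hG : ∀ (x : Int) (P : List α) (y z : α) (rest : List α),
        G (P ++ y :: z :: rest, (P.length : Int)) x = (P ++ f x :: g x :: rest, (P.length : Int) + 2)) :
    ∀ (xs : List Int) (P : List α) (r : Nat),
      xs.foldl G (P ++ List.replicate (2 * xs.length + r) b, (P.length : Int))
        = (P ++ xs.flatMap (fun x => [f x, g x]) ++ List.replicate r b,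
           (P.length : Int) + 2 * xs.length) := by
  intro xs
  induction xs with
  | nil => intro P r; simp
  | cons x xs ih =>
    intro P r
    rw [List.foldl_cons]
    have h1 : 2 * (x :: xs).length + r = ((2 * xs.length + r) + 1) + 1 := by simp; omega
    rw [h1, List.replicate_succ, List.replicate_succ]
    rw [hG]
    have h2 : ((P.length : Int) + 2) = (((P ++ [f x, g x]).length : Nat) : Int) := by
      simp
    have h3 : P ++ f x :: g x :: List.replicate (2 * xs.length + r) b
        = (P ++ [f x, g x]) ++ List.replicate (2 * xs.length + r) b := by simp
    rw [h2, h3, ih (P ++ [f x, g x]) r]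
    simp
    push_cast
    ring

-- element value written by the top/bottom a5 loop bodies
def pvFT (a4 : List PvSheet) (n : Nat) (x : PvSheet) : PvSheet :=
  ((x.1.set 0 ((pvRd a4 (n:Int)).1.getD 0 none)).set 1 ((pvRd a4 (n:Int)).1.getD 1 none),
   (x.2.set 0 ((pvRd a4 (n:Int)).2.getD 0 none)).set 1 ((pvRd a4 (n:Int)).2.getD 1 none))
def pvFB (a4 : List PvSheet) (n : Nat) (x : PvSheet) : PvSheet :=
  ((x.1.set 0 ((pvRd a4 (n:Int)).1.getD 2 none)).set 1 ((pvRd a4 (n:Int)).1.getD 3 none),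
   (x.2.set 0 ((pvRd a4 (n:Int)).2.getD 2 none)).set 1 ((pvRd a4 (n:Int)).2.getD 3 none))
-- the two values written per iteration of the two book_order loops
def pvF1 (a5 : List PvSheet) (j : Int) : Option Int := (pvRd a5 j).2.getD 1 none
def pvG1 (a5 : List PvSheet) (j : Int) : Option Int := (pvRd a5 j).1.getD 0 none
def pvF2 (a5 : List PvSheet) (j : Int) : Option Int := (pvRd a5 j).1.getD 1 none
def pvG2 (a5 : List PvSheet) (j : Int) : Option Int := (pvRd a5 j).2.getD 0 none
-- closed form of a5 sheets
def pvHT (n : Nat) : PvSheet :=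
  ([some (8*(n:Int)+1), some (8*(n:Int)+2)], [some (8*(n:Int)+5), some (8*(n:Int)+6)])
def pvHB (n : Nat) : PvSheet :=
  ([some (8*(n:Int)+3), some (8*(n:Int)+4)], [some (8*(n:Int)+7), some (8*(n:Int)+8)])

theorem pvA5Top_at (a4 : List PvSheet) (n : Nat) (P : List PvSheet) (x : PvSheet)
    (rest : List PvSheet) (hP : P.length = 0 + n) :
    pvA5Top a4 (P ++ x :: rest) (n : Int) = P ++ pvFT a4 n x :: rest := by
  have hn : n = P.length := by omega
  subst hn
  simp only [pvA5Top, pvFT, Int.toNat_natCast, pv_mod_pref]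

theorem pvA5Bot_at (St : Nat) (a4 : List PvSheet) (n : Nat) (P : List PvSheet) (x : PvSheet)
    (rest : List PvSheet) (hP : P.length = St + n) :
    pvA5Bot (St : Int) a4 (P ++ x :: rest) (n : Int) = P ++ pvFB a4 n x :: rest := by
  have ht : ((St : Int) + (n : Int)).toNat = P.length := by omega
  simp only [pvA5Bot, pvFB, ht, pv_mod_pref]

theorem pvBookStep1_at (a5 : List PvSheet) (x : Int) (P : List (Option Int)) (y z : Option Int)
    (rest : List (Option Int)) :
    pvBookStep1 a5 (P ++ y :: z :: rest, (P.length : Int)) x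
      = (P ++ pvF1 a5 x :: pvG1 a5 x :: rest, (P.length : Int) + 2) := by
  have h1 : ((P.length : Int)).toNat = P.length := by omega
  have h2 : ((P.length : Int) + 1).toNat = P.length + 1 := by omega
  simp only [pvBookStep1, pvF1, pvG1, h1, h2, pv_set_pref, pv_set_pref1]
  simp only [Prod.mk.injEq]
  exact ⟨trivial, by omega⟩

theorem pvBookStep2_at (a5 : List PvSheet) (x : Int) (P : List (Option Int)) (y z : Option Int)
    (rest : List (Option Int)) :
    pvBookStep2 a5 (P ++ y :: z :: rest, (P.length : Int)) x
      = (P ++ pvF2 a5 x :: pvG2 a5 x :: rest, (P.length : Int) + 2) := by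
  have h1 : ((P.length : Int)).toNat = P.length := by omega
  have h2 : ((P.length : Int) + 1).toNat = P.length + 1 := by omega
  simp only [pvBookStep2, pvF2, pvG2, h1, h2, pv_set_pref, pv_set_pref1]
  simp only [Prod.mk.injEq]
  exact ⟨trivial, by omega⟩

theorem pv_rd_map_range (g : Nat → PvSheet) (m n : Nat) (h : n < m) :
    pvRd ((List.range m).map g) (n : Int) = g n := by
  simp [pvRd, List.getD_eq_getElem?_getD, h]

theorem pv_rd_append_lt (X Y : List PvSheet) (j : Int) (_h0 : 0 ≤ j) (hj : j.toNat < X.length) :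
    pvRd (X ++ Y) j = pvRd X j := by
  simp [pvRd, List.getD_eq_getElem?_getD, List.getElem?_append_left hj]

theorem pv_rd_append_ge (X Y : List PvSheet) (j : Int) (hj : X.length ≤ j.toNat) :
    pvRd (X ++ Y) j = Y.getD (j.toNat - X.length) ([], []) := by
  simp [pvRd, List.getD_eq_getElem?_getD, List.getElem?_append_right hj]

theorem pv_enum_map_some {α : Type} (E : List α) (s : Int) :
    PySem.List.enumerate (E.map some) s = (PySem.List.enumerate E s).map (fun q => (q.1, some q.2)) := by
  induction E generalizing s with
  | nil => simp [PySem.List.enumerate_nil]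
  | cons a E ih => simp [PySem.List.enumerate_cons, ih]

theorem pv_rd_a5f (St : Nat) (j : Int) (h0 : 0 ≤ j) (hj : j < ((2*St:Nat):Int)) :
    pvRd ((List.range St).map pvHT ++ (List.range St).map pvHB) j
      = if j < (St:Int) then pvHT j.toNat else pvHB (j.toNat - St) := by
  by_cases h : j < (St:Int)
  · rw [if_pos h, pv_rd_append_lt _ _ j h0 (by simp; omega)]
    have hjj : j = ((j.toNat:Nat):Int) := by omega
    rw [hjj, pv_rd_map_range _ _ _ (by omega)]
    rw [← hjj]
  · rw [if_neg h, pv_rd_append_ge _ _ j (by simp; omega)]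
    simp only [List.length_map, List.length_range]
    rw [List.getD_eq_getElem?_getD, List.getElem?_map,
      List.getElem?_range (by omega : j.toNat - St < St)]
    rfl

theorem pv_entry (St : Nat) (j : Int) (h0 : 0 ≤ j) (hj : j < ((2*St:Nat):Int)) :
    pvF1 ((List.range St).map pvHT ++ (List.range St).map pvHB) j = some (pvHalf (St:Int) j).2.2.2
    ∧ pvG1 ((List.range St).map pvHT ++ (List.range St).map pvHB) j = some (pvHalf (St:Int) j).1
    ∧ pvF2 ((List.range St).map pvHT ++ (List.range St).map pvHB) j = some (pvHalf (St:Int) j).2.1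
    ∧ pvG2 ((List.range St).map pvHT ++ (List.range St).map pvHB) j = some (pvHalf (St:Int) j).2.2.1 := by
  unfold pvF1 pvG1 pvF2 pvG2
  rw [pv_rd_a5f St j h0 hj]
  by_cases h : j < (St:Int)
  · have hjj : ((j.toNat:Nat):Int) = j := by omega
    simp [h, pvHalf, pvHT, hjj]
  · have hjj : ((j.toNat - St:Nat):Int) = j - (St:Int) := by omega
    simp [h, pvHalf, pvHB, hjj]

theorem pv_len_flat2 {α : Type} (f g : Int → α) (xs : List Int) :
    (xs.flatMap (fun x => [f x, g x])).length = 2 * xs.length := by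
  induction xs with
  | nil => simp
  | cons x xs ih => simp [ih]; omega

-- ===== the scatter (print_order[pg-1] = index+1) characterization =====
def pvStep (po : List Int) (p : Int × Int) : List Int := po.set (p.2 - 1).toNat (p.1 + 1)

theorem pvScatter_len (E : List (Int × Int)) (po : List Int) :
    (E.foldl pvStep po).length = po.length := by
  induction E generalizing po with
  | nil => rfl
  | cons a E ih => rw [List.foldl_cons, ih]; simp [pvStep]

theorem pvScatter_no (E : List (Int × Int)) (po : List Int) (q : Nat)
    (h : ∀ p ∈ E, (p.2 - 1).toNat ≠ q) : (E.foldl pvStep po)[q]? = po[q]? := by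
  induction E generalizing po with
  | nil => rfl
  | cons a E ih =>
    rw [List.foldl_cons, ih _ (fun p hp => h p (List.mem_cons_of_mem a hp))]
    exact List.getElem?_set_ne (h a (by simp))

theorem pvScatter_yes (E : List (Int × Int)) (po : List Int) (q : Nat) (p : Int × Int)
    (hnd : (E.map (fun r => (r.2 - 1).toNat)).Nodup) (hmem : p ∈ E)
    (ht : (p.2 - 1).toNat = q) (hq : q < po.length) :
    (E.foldl pvStep po)[q]? = some (p.1 + 1) := by
  induction E generalizing po with
  | nil => cases hmem
  | cons a E ih =>
    rw [List.map_cons, List.nodup_cons] at hnd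
    rw [List.foldl_cons]
    by_cases hpE : p ∈ E
    · exact ih _ hnd.2 hpE (by simpa [pvStep] using hq)
    · have hpa : p = a := by
        rcases List.mem_cons.mp hmem with h | h
        · exact h
        · exact absurd h hpE
      subst hpa
      have hnone : ∀ r ∈ E, (r.2 - 1).toNat ≠ q := by
        intro r hr hrq
        exact hnd.1 (by rw [ht, ← hrq]; exact List.mem_map_of_mem hr)
      rw [pvScatter_no E _ q hnone]
      simp only [pvStep]
      rw [ht]
      exact List.getElem?_set_self hq

-- 0-based book-order slot of book page q (q 0-based) and its inverse: the 0-based book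
-- page written at slot k (both as closed Nat formulas)
def pvPos (St q : Nat) : Nat :=
  if q % 8 = 0 then 2*(q/8) + 1
  else if q % 8 = 1 then 8*St - 2 - 2*(q/8)
  else if q % 8 = 2 then 2*St + 2*(q/8) + 1
  else if q % 8 = 3 then 6*St - 2*(q/8) - 2
  else if q % 8 = 4 then 8*St - 1 - 2*(q/8)
  else if q % 8 = 5 then 2*(q/8)
  else if q % 8 = 6 then 6*St - 2*(q/8) - 1
  else 2*St + 2*(q/8)

def pvTgt (St k : Nat) : Nat :=
  if k < 4*St then
    if k % 2 = 0 then (if k/2 < St then 8*(k/2) + 5 else 8*(k/2 - St) + 7)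
    else (if k/2 < St then 8*(k/2) else 8*(k/2 - St) + 2)
  else
    if k % 2 = 0 then
      (if 2*St - 1 - (k - 4*St)/2 < St then 8*(2*St - 1 - (k - 4*St)/2) + 1
       else 8*(2*St - 1 - (k - 4*St)/2 - St) + 3)
    else
      (if 2*St - 1 - (k - 4*St)/2 < St then 8*(2*St - 1 - (k - 4*St)/2) + 4
       else 8*(2*St - 1 - (k - 4*St)/2 - St) + 6)

theorem pvPos_lt (St q : Nat) (hq : q < 8*St) : pvPos St q < 8*St := by
  unfold pvPos; split_ifs <;> omega

theorem pvPos_tgt (St k : Nat) (hk : k < 8*St) : pvPos St (pvTgt St k) = k := by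
  unfold pvTgt
  split_ifs <;> (unfold pvPos; split_ifs <;> omega)

theorem pvTgt_pos (St q : Nat) (hq : q < 8*St) : pvTgt St (pvPos St q) = q := by
  unfold pvPos
  split_ifs <;> (unfold pvTgt; split_ifs <;> omega)

-- flatMap of pairs over a range, as a single map over a doubled range
theorem pv_flat2 (a b : Nat → Int) (n : Nat) :
    (List.range n).flatMap (fun m => [a m, b m])
      = (List.range (2*n)).map (fun k => if k % 2 = 0 then a (k/2) else b (k/2)) := by
  induction n with
  | zero => simp
  | succ n ih =>
    rw [List.range_succ, List.flatMap_append, ih,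
      show 2*(n+1) = 2*n + 2 from by ring, List.range_add, List.map_append]
    congr 1
    have e0 : (2*n + 0) % 2 = 0 := by omega
    have e1 : (2*n + 0) / 2 = n := by omega
    have e2 : (2*n + 1) % 2 = 1 := by omega
    have e3 : (2*n + 1) / 2 = n := by omega
    simp [List.range_succ, e0, e1, e2, e3]

theorem pv_flat2_rev (a b : Nat → Int) (n : Nat) :
    (List.range n).reverse.flatMap (fun m => [a m, b m])
      = (List.range (2*n)).map (fun k => if k % 2 = 0 then a (n-1-k/2) else b (n-1-k/2)) := by
  induction n with
  | zero => simp
  | succ n ih =>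
    rw [List.range_succ, List.reverse_append, List.reverse_singleton, List.singleton_append,
      List.flatMap_cons, ih]
    rw [show 2*(n+1) = 2 + 2*n from by ring, List.range_add, List.map_append, List.map_map]
    congr 1
    norm_num [List.range_succ]
    intro k hk
    by_cases h2 : k % 2 = 0
    · rw [if_pos h2, if_pos h2]
      congr 1
      omega
    · rw [if_neg h2, if_neg h2]
      congr 1
      omega

-- the book_order list A builds, written as a single map over indices
theorem pv_book (St : Nat) :
    (PySem.List.pyRange 0 ((2*St:Nat):Int) 1).flatMap
        (fun m => [(pvHalf (St:Int) m).2.2.2, (pvHalf (St:Int) m).1])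
      ++ (PySem.List.pyRange 0 ((2*St:Nat):Int) 1).reverse.flatMap
        (fun m => [(pvHalf (St:Int) m).2.1, (pvHalf (St:Int) m).2.2.1])
    = (List.range (8*St)).map (fun k => ((pvTgt St k : Nat) : Int) + 1) := by
  rw [PySem.List.pyRange_zero_natCast, List.flatMap_map, ← List.map_reverse, List.flatMap_map]
  rw [pv_flat2 (fun m => (pvHalf (St:Int) (m:Int)).2.2.2) (fun m => (pvHalf (St:Int) (m:Int)).1) (2*St)]
  rw [pv_flat2_rev (fun m => (pvHalf (St:Int) (m:Int)).2.1) (fun m => (pvHalf (St:Int) (m:Int)).2.2.1) (2*St)]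
  rw [show 8*St = 2*(2*St) + 2*(2*St) from by ring, List.range_add, List.map_append, List.map_map]
  congr 1
  · refine List.map_congr_left (fun k hk => ?_)
    have hk' : k < 2*(2*St) := List.mem_range.mp hk
    simp only [pvHalf, pvTgt]
    by_cases hm : k/2 < St
    · have hmi : ((k/2 : Nat) : Int) < (St : Int) := by exact_mod_cast hm
      simp only [if_pos hmi, if_pos hm, if_pos (show k < 4*St by omega)]
      by_cases h2 : k % 2 = 0 <;> simp [h2] <;> push_cast <;> ring
    · have hmi : ¬ (((k/2 : Nat) : Int) < (St : Int)) := by exact_mod_cast hm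
      simp only [if_neg hmi, if_neg hm, if_pos (show k < 4*St by omega)]
      by_cases h2 : k % 2 = 0 <;> simp [h2] <;> omega
  · refine List.map_congr_left (fun k hk => ?_)
    have hk' : k < 2*(2*St) := List.mem_range.mp hk
    simp only [Function.comp, pvHalf, pvTgt]
    have hnl : ¬ (2*(2*St) + k < 4*St) := by omega
    have he1 : (2*(2*St) + k) % 2 = k % 2 := by omega
    have he2 : (2*(2*St) + k - 4*St) / 2 = k / 2 := by omega
    rw [if_neg hnl, he1, he2]
    by_cases hm : 2*St - 1 - k/2 < St
    · have hmi : ((2*St - 1 - k/2 : Nat) : Int) < (St : Int) := by exact_mod_cast hm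
      simp only [if_pos hmi, if_pos hm]
      by_cases h2 : k % 2 = 0 <;> simp [h2] <;> omega
    · have hmi : ¬ (((2*St - 1 - k/2 : Nat) : Int) < (St : Int)) := by exact_mod_cast hm
      simp only [if_neg hmi, if_neg hm]
      by_cases h2 : k % 2 = 0 <;> simp [h2] <;> omega

-- B's loop body at a nonnegative index, in terms of pvPos
theorem pv_alt_body (St q : Nat) (hq : q < 8*St) :
    (fun (qi : Int) =>
      let s := PySem.Int.floordiv qi 8
      let r := PySem.Int.mod qi 8
      if r = 0 then 2*s + 2
      else if r = 1 then 8*(St:Int) - 2*s - 1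
      else if r = 2 then 2*(St:Int) + 2*s + 2
      else if r = 3 then 6*(St:Int) - 2*s - 1
      else if r = 4 then 8*(St:Int) - 2*s
      else if r = 5 then 2*s + 1
      else if r = 6 then 6*(St:Int) - 2*s
      else 2*(St:Int) + 2*s + 1) ((q:Nat):Int)
    = ((pvPos St q : Nat) : Int) + 1 := by
  have hfd : PySem.Int.floordiv ((q:Nat):Int) 8 = ((q/8 : Nat) : Int) := by
    exact_mod_cast PySem.Int.floordiv_natCast q 8
  have hmd : PySem.Int.mod ((q:Nat):Int) 8 = ((q%8 : Nat) : Int) := by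
    exact_mod_cast PySem.Int.mod_natCast q 8
  simp only [hfd, hmd, pvPos]
  have h8 : q%8 = 0 ∨ q%8 = 1 ∨ q%8 = 2 ∨ q%8 = 3 ∨ q%8 = 4 ∨ q%8 = 5 ∨ q%8 = 6 ∨ q%8 = 7 := by
    omega
  rcases h8 with h|h|h|h|h|h|h|h <;> simp [h] <;> omega

theorem foop_spec : Claim_equal_foop := by
  intro pc _ hpre
  obtain ⟨hne, hmod⟩ := hpre
  have hpc : PySem.Int.floordiv pc 8 * 8 + PySem.Int.mod pc 8 = pc :=
    PySem.Int.floordiv_mul_add_mod pc 8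
  rw [hmod, add_zero] at hpc
  unfold Spec_foop
  by_cases hSpos : 0 ≤ PySem.Int.floordiv pc 8
  · obtain ⟨St, hSt⟩ : ∃ St : Nat, PySem.Int.floordiv pc 8 = (St : Int) :=
      ⟨_, (Int.toNat_of_nonneg hSpos).symm⟩
    have hpc8 : pc = ((8 * St : Nat) : Int) := by push_cast; omega
    have hcast2 : (St:Int) * 2 = ((St + St : Nat) : Int) := by push_cast; ring
    have hRange : PySem.List.pyRange 0 ((St:Int)) 1 = (List.range St).map (fun (k:Nat) => (k:Int)) :=
      PySem.List.pyRange_zero_natCast St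
    have hA40 : ((List.range St).map (fun (k:Nat) => (k:Int))).map
        (fun _ => (List.replicate 4 (none:Option Int), List.replicate 4 (none:Option Int)))
        = List.replicate St pvBlank4 := by
      simp [List.map_map, pvBlank4, Function.comp_def, List.map_const']
    have hA4 : ((List.range St).map (fun (k:Nat) => (k:Int))).foldl pvA4Step
        (List.replicate St pvBlank4, 1)
        = ((List.range St).map (fun (n:Nat) => pvG4 (n:Int)), 8*(St:Int)+1) := by
      rw [List.foldl_map]
      have h := pv_a4_go St 0 0 [] rfl
      simpa [← List.range_eq_range'] using h
    -- a5 characterization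
    have hA50 : ((List.range (St+St)).map (fun (k:Nat) => (k:Int))).map
        (fun _ => (List.replicate 2 (none:Option Int), List.replicate 2 (none:Option Int)))
        = List.replicate (St + St) pvBlank2 := by
      simp [List.map_map, pvBlank2, Function.comp_def, List.map_const']
    have hTop : ((List.range St).map (fun (k:Nat) => (k:Int))).foldl
        (pvA5Top ((List.range St).map (fun (n:Nat) => pvG4 (n:Int))))
        (List.replicate (St + St) pvBlank2)
        = (List.range St).map (fun n => pvFT ((List.range St).map (fun (n:Nat) => pvG4 (n:Int))) n pvBlank2)
          ++ List.replicate St pvBlank2 := by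
      rw [List.foldl_map]
      have h := pv_fill_go (fun l n => pvA5Top ((List.range St).map (fun (n:Nat) => pvG4 (n:Int))) l (n:Int))
        (pvFT ((List.range St).map (fun (n:Nat) => pvG4 (n:Int)))) pvBlank2 0
        (fun n P x rest hP => pvA5Top_at _ n P x rest hP) St 0 St [] rfl
      simpa [← List.range_eq_range'] using h
    have hBot : ((List.range St).map (fun (k:Nat) => (k:Int))).foldl
        (pvA5Bot ((St:Int)) ((List.range St).map (fun (n:Nat) => pvG4 (n:Int))))
        ((List.range St).map (fun n => pvFT ((List.range St).map (fun (n:Nat) => pvG4 (n:Int))) n pvBlank2)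
          ++ List.replicate St pvBlank2)
        = (List.range St).map (fun n => pvFT ((List.range St).map (fun (n:Nat) => pvG4 (n:Int))) n pvBlank2)
          ++ (List.range St).map (fun n => pvFB ((List.range St).map (fun (n:Nat) => pvG4 (n:Int))) n pvBlank2) := by
      rw [List.foldl_map]
      have h := pv_fill_go (fun l n => pvA5Bot ((St:Int)) ((List.range St).map (fun (n:Nat) => pvG4 (n:Int))) l (n:Int))
        (pvFB ((List.range St).map (fun (n:Nat) => pvG4 (n:Int)))) pvBlank2 St
        (fun n P x rest hP => pvA5Bot_at St _ n P x rest hP) St 0 0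
        ((List.range St).map (fun n => pvFT ((List.range St).map (fun (n:Nat) => pvG4 (n:Int))) n pvBlank2))
        (by simp)
      simpa [← List.range_eq_range'] using h
    have hTT : (List.range St).map (fun n => pvFT ((List.range St).map (fun (n:Nat) => pvG4 (n:Int))) n pvBlank2)
        = (List.range St).map pvHT := by
      refine List.map_congr_left (fun n hn => ?_)
      have hn' : n < St := List.mem_range.mp hn
      simp [pvFT, pv_rd_map_range _ _ _ hn', pvG4, pvHT, pvBlank2, List.replicate, List.set]
    have hBB : (List.range St).map (fun n => pvFB ((List.range St).map (fun (n:Nat) => pvG4 (n:Int))) n pvBlank2)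
        = (List.range St).map pvHB := by
      refine List.map_congr_left (fun n hn => ?_)
      have hn' : n < St := List.mem_range.mp hn
      simp [pvFB, pv_rd_map_range _ _ _ hn', pvG4, pvHB, pvBlank2, List.replicate, List.set]
    -- book_order characterization
    have hlen5 : ((((List.range St).map pvHT ++ (List.range St).map pvHB)).length : Int)
        = ((2*St:Nat):Int) := by simp; push_cast; ring
    have hxs : (PySem.List.pyRange 0 ((2*St:Nat):Int) 1).length = 2*St := by
      simp [PySem.List.length_pyRange_one]; omega
    have hBO : ((List.range (8*St)).map (fun (k:Nat) => (k:Int))).map (fun _ => (none:Option Int))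
        = List.replicate (8*St) (none:Option Int) := by
      simp [List.map_map, Function.comp_def, List.map_const']
    have hPO : ((List.range (8*St)).map (fun (k:Nat) => (k:Int))).map (fun _ => (0:Int))
        = List.replicate (8*St) (0:Int) := by
      simp [List.map_map, Function.comp_def, List.map_const']
    have hB1 : (PySem.List.pyRange 0 ((2*St:Nat):Int) 1).foldl
        (pvBookStep1 ((List.range St).map pvHT ++ (List.range St).map pvHB))
        (List.replicate (8*St) (none:Option Int), 0)
        = ((PySem.List.pyRange 0 ((2*St:Nat):Int) 1).flatMap
            (fun j => [pvF1 ((List.range St).map pvHT ++ (List.range St).map pvHB) j,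
                       pvG1 ((List.range St).map pvHT ++ (List.range St).map pvHB) j])
            ++ List.replicate (4*St) (none:Option Int), 4*(St:Int)) := by
      have h := pv_fill2_go (pvBookStep1 ((List.range St).map pvHT ++ (List.range St).map pvHB))
        (pvF1 ((List.range St).map pvHT ++ (List.range St).map pvHB))
        (pvG1 ((List.range St).map pvHT ++ (List.range St).map pvHB)) none
        (fun x P y z rest => pvBookStep1_at _ x P y z rest)
        (PySem.List.pyRange 0 ((2*St:Nat):Int) 1) [] (4*St)
      rw [hxs] at h
      have harg : 2 * (2*St) + 4*St = 8*St := by omega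
      rw [harg] at h
      have hc4 : (2:Int) * (2 * (St:Int)) = 4 * (St:Int) := by ring
      simpa [hc4] using h
    have hFL1len : ((PySem.List.pyRange 0 ((2*St:Nat):Int) 1).flatMap
        (fun j => [pvF1 ((List.range St).map pvHT ++ (List.range St).map pvHB) j,
                   pvG1 ((List.range St).map pvHT ++ (List.range St).map pvHB) j])).length
        = 4*St := by
      rw [pv_len_flat2, hxs]; omega
    have hB2 : ((PySem.List.pyRange 0 ((2*St:Nat):Int) 1).reverse).foldl
        (pvBookStep2 ((List.range St).map pvHT ++ (List.range St).map pvHB))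
        ((PySem.List.pyRange 0 ((2*St:Nat):Int) 1).flatMap
            (fun j => [pvF1 ((List.range St).map pvHT ++ (List.range St).map pvHB) j,
                       pvG1 ((List.range St).map pvHT ++ (List.range St).map pvHB) j])
          ++ List.replicate (4*St) (none:Option Int), 4*(St:Int))
        = ((PySem.List.pyRange 0 ((2*St:Nat):Int) 1).flatMap
            (fun j => [pvF1 ((List.range St).map pvHT ++ (List.range St).map pvHB) j,
                       pvG1 ((List.range St).map pvHT ++ (List.range St).map pvHB) j])
          ++ ((PySem.List.pyRange 0 ((2*St:Nat):Int) 1).reverse).flatMap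
            (fun j => [pvF2 ((List.range St).map pvHT ++ (List.range St).map pvHB) j,
                       pvG2 ((List.range St).map pvHT ++ (List.range St).map pvHB) j]),
          8*(St:Int)) := by
      have h := pv_fill2_go (pvBookStep2 ((List.range St).map pvHT ++ (List.range St).map pvHB))
        (pvF2 ((List.range St).map pvHT ++ (List.range St).map pvHB))
        (pvG2 ((List.range St).map pvHT ++ (List.range St).map pvHB)) none
        (fun x P y z rest => pvBookStep2_at _ x P y z rest)
        ((PySem.List.pyRange 0 ((2*St:Nat):Int) 1).reverse)
        ((PySem.List.pyRange 0 ((2*St:Nat):Int) 1).flatMap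
            (fun j => [pvF1 ((List.range St).map pvHT ++ (List.range St).map pvHB) j,
                       pvG1 ((List.range St).map pvHT ++ (List.range St).map pvHB) j])) 0
      rw [List.length_reverse, hxs] at h
      have harg : 2 * (2*St) + 0 = 4*St := by omega
      rw [harg, hFL1len] at h
      have hc8 : 4*(St:Int) + 2 * (2*(St:Int)) = 8*(St:Int) := by ring
      simpa [hc8] using h
    have hENT1 : (PySem.List.pyRange 0 ((2*St:Nat):Int) 1).flatMap (fun j => [pvF1 ((List.range St).map pvHT ++ (List.range St).map pvHB) j, pvG1 ((List.range St).map pvHT ++ (List.range St).map pvHB) j])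
        = (PySem.List.pyRange 0 ((2*St:Nat):Int) 1).flatMap (fun m => [some (pvHalf (St:Int) m).2.2.2, some (pvHalf (St:Int) m).1]) := by
      refine List.flatMap_congr (fun j hj => ?_)
      obtain ⟨h0j, hjj⟩ := PySem.List.mem_pyRange_one.mp hj
      obtain ⟨e1, e2, e3, e4⟩ := pv_entry St j h0j hjj
      rw [e1, e2]
    have hENT2 : (PySem.List.pyRange 0 ((2*St:Nat):Int) 1).reverse.flatMap (fun j => [pvF2 ((List.range St).map pvHT ++ (List.range St).map pvHB) j, pvG2 ((List.range St).map pvHT ++ (List.range St).map pvHB) j])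
        = (PySem.List.pyRange 0 ((2*St:Nat):Int) 1).reverse.flatMap (fun m => [some (pvHalf (St:Int) m).2.1, some (pvHalf (St:Int) m).2.2.1]) := by
      refine List.flatMap_congr (fun j hj => ?_)
      obtain ⟨h0j, hjj⟩ := PySem.List.mem_pyRange_one.mp (List.mem_reverse.mp hj)
      obtain ⟨e1, e2, e3, e4⟩ := pv_entry St j h0j hjj
      rw [e3, e4]
    have hmapsome : (PySem.List.pyRange 0 ((2*St:Nat):Int) 1).flatMap (fun j => [pvF1 ((List.range St).map pvHT ++ (List.range St).map pvHB) j, pvG1 ((List.range St).map pvHT ++ (List.range St).map pvHB) j])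
          ++ (PySem.List.pyRange 0 ((2*St:Nat):Int) 1).reverse.flatMap (fun j => [pvF2 ((List.range St).map pvHT ++ (List.range St).map pvHB) j, pvG2 ((List.range St).map pvHT ++ (List.range St).map pvHB) j])
        = (((PySem.List.pyRange 0 ((2*St:Nat):Int) 1).flatMap (fun m => [(pvHalf (St:Int) m).2.2.2, (pvHalf (St:Int) m).1])
            ++ (PySem.List.pyRange 0 ((2*St:Nat):Int) 1).reverse.flatMap (fun m => [(pvHalf (St:Int) m).2.1, (pvHalf (St:Int) m).2.2.1])).map some) := by
      rw [hENT1, hENT2]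
      simp [List.map_flatMap]
    -- B's output, in closed form
    have hBside : foop_alt pc = (List.range (8*St)).map (fun k => ((pvPos St k : Nat) : Int) + 1) := by
      simp only [foop_alt]
      rw [hSt, hpc8, PySem.List.pyRange_zero_natCast (8*St), List.foldl_map,
        PySem.List.foldl_append_singleton_eq_map, List.nil_append]
      refine List.map_congr_left (fun q hq => ?_)
      exact pv_alt_body St q (List.mem_range.mp hq)
    -- assemble A's output and compare elementwise
    simp only [foop]
    rw [hBside]
    rw [hSt, hpc8, hcast2, hRange, PySem.List.pyRange_zero_natCast (St+St),
      PySem.List.pyRange_zero_natCast (8*St)]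
    rw [hA40, hA4]
    rw [show ((List.range St).map (fun (n:Nat) => pvG4 (n:Int)), 8*(St:Int)+1).1
        = (List.range St).map (fun (n:Nat) => pvG4 (n:Int)) from rfl]
    rw [hA50, hTop, hBot, hTT, hBB, hlen5, hBO, hPO, hB1, hB2]
    rw [show ((PySem.List.pyRange 0 ((2*St:Nat):Int) 1).flatMap (fun j => [pvF1 ((List.range St).map pvHT ++ (List.range St).map pvHB) j, pvG1 ((List.range St).map pvHT ++ (List.range St).map pvHB) j])
          ++ (PySem.List.pyRange 0 ((2*St:Nat):Int) 1).reverse.flatMap (fun j => [pvF2 ((List.range St).map pvHT ++ (List.range St).map pvHB) j, pvG2 ((List.range St).map pvHT ++ (List.range St).map pvHB) j]), 8*(St:Int)).1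
        = (PySem.List.pyRange 0 ((2*St:Nat):Int) 1).flatMap (fun j => [pvF1 ((List.range St).map pvHT ++ (List.range St).map pvHB) j, pvG1 ((List.range St).map pvHT ++ (List.range St).map pvHB) j])
          ++ (PySem.List.pyRange 0 ((2*St:Nat):Int) 1).reverse.flatMap (fun j => [pvF2 ((List.range St).map pvHT ++ (List.range St).map pvHB) j, pvG2 ((List.range St).map pvHT ++ (List.range St).map pvHB) j]) from rfl]
    rw [hmapsome, pv_book, pv_enum_map_some, List.foldl_map]
    have hstep : (fun (x : List Int) (y : Int × Int) =>
        x.set (((y.1, some y.2).2.getD 0) - 1).toNat ((y.1, some y.2).1 + 1)) = pvStep := rfl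
    rw [hstep]
    -- elementwise comparison of the scatter with B's closed form
    refine List.ext_getElem?_iff.mpr (fun q => ?_)
    by_cases hq : q < 8*St
    · have hRHS : ((List.range (8*St)).map (fun k => ((pvPos St k : Nat) : Int) + 1))[q]?
          = some (((pvPos St q : Nat) : Int) + 1) := by
        rw [List.getElem?_map, List.getElem?_range hq]
        rfl
      rw [hRHS]
      have hL : ((List.range (8*St)).map (fun k => ((pvTgt St k : Nat) : Int) + 1)).length = 8*St := by
        simp
      refine pvScatter_yes _ _ q (((pvPos St q : Nat) : Int), ((q:Nat):Int) + 1) ?_ ?_ ?_ ?_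
      · -- targets are pairwise distinct
        have hmap : (PySem.List.enumerate ((List.range (8*St)).map (fun k => ((pvTgt St k : Nat) : Int) + 1)) 0).map
              (fun r => (r.2 - 1).toNat)
            = (List.range (8*St)).map (pvTgt St) := by
          rw [show (fun (r : Int × Int) => (r.2 - 1).toNat) = (fun v => (v - 1).toNat) ∘ (fun (r : Int × Int) => r.2) from rfl,
            ← List.map_map, PySem.List.map_snd_enumerate, List.map_map]
          refine List.map_congr_left (fun k _ => ?_)
          simp
        rw [hmap]
        refine (List.nodup_map_iff_inj_on List.nodup_range).mpr (fun x hx y hy hxy => ?_)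
        have hx' : x < 8*St := List.mem_range.mp hx
        have hy' : y < 8*St := List.mem_range.mp hy
        rw [← pvPos_tgt St x hx', ← pvPos_tgt St y hy', hxy]
      · -- membership: the pair (position, page) occurs in the enumeration
        rw [PySem.List.mem_enumerate_iff]
        refine ⟨pvPos St q, by simpa [hL] using pvPos_lt St q hq, ?_⟩
        have hget : ((List.range (8*St)).map (fun k => ((pvTgt St k : Nat) : Int) + 1))[pvPos St q]'(by simpa [hL] using pvPos_lt St q hq)
            = ((pvTgt St (pvPos St q) : Nat) : Int) + 1 := by
          simp
        rw [hget, pvTgt_pos St q hq]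
        simp
      · simp
      · simpa using hq
    · rw [List.getElem?_eq_none (by simpa [pvScatter_len, PySem.List.length_enumerate] using by omega),
        List.getElem?_eq_none (by simpa using by omega)]
  · have hSneg : PySem.Int.floordiv pc 8 ≤ 0 := by omega
    have hpcneg : pc ≤ 0 := by omega
    have h1 : PySem.List.pyRange 0 (PySem.Int.floordiv pc 8) 1 = [] :=
      PySem.List.pyRange_one_eq_nil hSneg
    have h2 : PySem.List.pyRange 0 (PySem.Int.floordiv pc 8 * 2) 1 = [] :=
      PySem.List.pyRange_one_eq_nil (by omega)
    have h4 : PySem.List.pyRange 0 pc 1 = [] := PySem.List.pyRange_one_eq_nil hpcneg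
    have h5 : PySem.List.pyRange 0 (0 : Int) 1 = [] := PySem.List.pyRange_one_eq_nil le_rfl
    simp only [foop, foop_alt, h1, h2, h4, h5, List.map_nil, List.foldl_nil,
      List.length_nil, Nat.cast_zero, List.reverse_nil, PySem.List.enumerate_nil]
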